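-- pv_equiv track=rewrite | github.com/bohdanvan/advent-of-code | src/advent_of_code_2024/day4/day4.py | to_desc_diagonals
-- ===== SOURCE A (Python) =====
-- from typing import List
--
-- def to_desc_diagonals(matrix: List[str]) -> List[str]:
--     res: List[List[str]] = []
--
--     diagonal: List[str]
--     for j_idx in range(len(matrix[0]) - 1, 0, -1):
--         diagonal = []
--         i, j = 0, j_idx
--         while is_valid_index(i, j, matrix):
--             diagonal.append(matrix[i][j])
--             i, j = i + 1, j + 1
--         res.append(diagonal)
--
--     for i_idx in range(0, len(matrix)):
--         diagonal = []
--         i, j = i_idx, 0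
--         while is_valid_index(i, j, matrix):
--             diagonal.append(matrix[i][j])
--             i, j = i + 1, j + 1
--         res.append(diagonal)
--
--     return ["".join(row) for row in res]
--
-- def is_valid_index(i: int, j: int, matrix: List[str]) -> bool:
--     return i >= 0 and i < len(matrix) and j >= 0 and j < len(matrix[0])
-- ===== SOURCE B (Python) =====
-- def to_desc_diagonals(matrix):
--     n, m = len(matrix), len(matrix[0])
--     buckets = {}
--     for i in range(n):
--         for j in range(m):
--             buckets.setdefault(i - j, []).append(matrix[i][j])
--     keys = list(range(-(m - 1), 0)) + list(range(n))
--     return ["".join(buckets.get(d, [])) for d in keys]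
-- ===== Notes on version B (the rewrite author's own statement) =====
-- stated objective: alternative
-- what changed: replaces A's two passes of cursor-walks ((i,j) stepped down-right until is_valid_index fails, once per diagonal) with one row-major scan that groups the cells into a dict of buckets keyed by the diagonal index d=i-j, then joins the buckets in A's diagonal order
import Mathlib
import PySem

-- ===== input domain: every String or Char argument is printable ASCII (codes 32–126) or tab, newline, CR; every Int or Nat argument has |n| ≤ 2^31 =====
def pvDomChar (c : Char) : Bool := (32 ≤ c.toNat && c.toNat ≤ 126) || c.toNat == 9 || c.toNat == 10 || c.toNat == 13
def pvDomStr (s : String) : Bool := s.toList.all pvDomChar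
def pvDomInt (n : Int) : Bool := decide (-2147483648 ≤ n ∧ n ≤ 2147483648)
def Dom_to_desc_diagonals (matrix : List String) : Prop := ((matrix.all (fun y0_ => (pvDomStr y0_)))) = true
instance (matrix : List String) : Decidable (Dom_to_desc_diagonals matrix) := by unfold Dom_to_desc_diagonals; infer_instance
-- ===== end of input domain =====

-- B replaces A's per-diagonal cursor walks with a single row-major scan that groups the
-- cells into a dict of buckets keyed by the diagonal index d = i - j (objective: alternative; same cost).

-- ===== PORT A =====
-- helper: Python's is_valid_index(i, j, matrix)
def pvIsValidIndex (i j : Int) (matrix : List String) : Bool :=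
  decide (0 ≤ i) && decide (i < (matrix.length : Int)) && decide (0 ≤ j) &&
    decide (j < ((((PySem.List.pyGet? matrix 0).getD "").toList.length : Int)))

-- the 'while is_valid_index: diagonal.append(matrix[i][j]); i, j = i+1, j+1' loop
-- (fuel bounds the recursion; the loop runs at most matrix.length steps since i increases)
def pvWalk (matrix : List String) : Nat → Int → Int → List Char
  | 0, _, _ => []
  | fuel + 1, i, j =>
      if pvIsValidIndex i j matrix then
        ((PySem.List.pyGet? (((PySem.List.pyGet? matrix i).getD "").toList) j).getD ' ')
          :: pvWalk matrix fuel (i + 1) (j + 1)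
      else []

def to_desc_diagonals (matrix : List String) : List String :=
  let res1 :=
    (PySem.List.pyRange (((((PySem.List.pyGet? matrix 0).getD "").toList.length : Int)) - 1) 0 (-1)).map
      (fun jIdx => pvWalk matrix (matrix.length + 1) 0 jIdx)
  let res2 :=
    (PySem.List.pyRange 0 (matrix.length : Int) 1).map
      (fun iIdx => pvWalk matrix (matrix.length + 1) iIdx 0)
  (res1 ++ res2).map (fun row => String.ofList row)

-- ===== PORT B =====
def to_desc_diagonals_alt (matrix : List String) : List String :=
  let n : Int := matrix.length
  let m : Int := (((PySem.List.pyGet? matrix 0).getD "").toList.length : Int)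
  let buckets := (PySem.List.pyRange 0 n 1).foldl (fun bs i =>
      (PySem.List.pyRange 0 m 1).foldl (fun bs j =>
        bs.modify (i - j) ([] : List Char)
          (fun b => b ++ [(PySem.List.pyGet? (((PySem.List.pyGet? matrix i).getD "").toList) j).getD ' '])) bs)
    (PySem.Dict.empty : PySem.Dict Int (List Char))
  let keys := PySem.List.pyRange (-(m - 1)) 0 1 ++ PySem.List.pyRange 0 n 1
  keys.map (fun d => String.ofList (buckets.getD d []))

-- ===== PRECONDITION & SPEC =====
-- Pre_ excludes exactly the inputs on which A raises IndexError: the empty matrix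
-- (len(matrix[0])), and a matrix with a nonempty first row and some row shorter than row 0
-- (every cell (i, j) with j < len(matrix[0]) is read by some diagonal walk).
def Pre_to_desc_diagonals (matrix : List String) : Prop :=
  match matrix with
  | [] => False
  | r :: _ => r.toList.length = 0 ∨ ∀ s ∈ matrix, r.toList.length ≤ s.toList.length
instance (matrix : List String) : Decidable (Pre_to_desc_diagonals matrix) := by
  unfold Pre_to_desc_diagonals; cases matrix <;> infer_instance

def pvWitness_to_desc_diagonals : List String := ["abc", "def", "ghi"]

def Spec_to_desc_diagonals (matrix : List String) (out : List String) : Prop := out = to_desc_diagonals_alt matrix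
instance (matrix : List String) (out : List String) : Decidable (Spec_to_desc_diagonals matrix out) := by unfold Spec_to_desc_diagonals; infer_instance

-- ===== CLAIM (what is proved, stated in full; the proofs are below) =====
def Claim_equal_to_desc_diagonals : Prop := ∀ (matrix : List String), Dom_to_desc_diagonals matrix → Pre_to_desc_diagonals matrix → Spec_to_desc_diagonals matrix (to_desc_diagonals matrix)

-- ===== LEMMAS AND PROOFS =====

-- width of the grid: len(matrix[0]) (0 when matrix is empty, as the ports' getD reads it)
def pvM (matrix : List String) : Int := (((PySem.List.pyGet? matrix 0).getD "").toList.length : Int)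

-- the character both ports read at row i of diagonal d = i - j
def pvCell (matrix : List String) (d i : Int) : Char :=
  (PySem.List.pyGet? (((PySem.List.pyGet? matrix i).getD "").toList) (i - d)).getD ' '

-- the diagonal d as the closed-form list of its cells
def pvDiag (matrix : List String) (d : Int) : List Char :=
  (PySem.List.pyRange (max d 0) (min (matrix.length : Int) (d + pvM matrix)) 1).map (pvCell matrix d)

-- the (diagonal-key, character) pairs B's inner loop scatters for row i
def pvRow (matrix : List String) (i : Int) : List (Int × Char) :=
  (PySem.List.pyRange 0 (pvM matrix) 1).map (fun j =>
    (i - j, (PySem.List.pyGet? (((PySem.List.pyGet? matrix i).getD "").toList) j).getD ' '))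

-- ===== A-side: the walks are the closed-form diagonals =====

lemma pvWalk_eq (matrix : List String) : ∀ (fuel : Nat) (i d : Int), 0 ≤ i → 0 ≤ i - d →
    (matrix.length : Int) - i ≤ fuel →
    pvWalk matrix fuel i (i - d) =
      (PySem.List.pyRange i (min (matrix.length : Int) (d + pvM matrix)) 1).map (pvCell matrix d) := by
  intro fuel
  induction fuel with
  | zero =>
      intro i d hi hj hf
      rw [PySem.List.pyRange_one_eq_nil (by omega)]
      rfl
  | succ fuel ih =>
      intro i d hi hj hf
      by_cases hv : pvIsValidIndex i (i - d) matrix = true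
      · simp only [pvIsValidIndex, Bool.and_eq_true, decide_eq_true_eq] at hv
        obtain ⟨⟨⟨_, hin⟩, _⟩, hjm⟩ := hv
        rw [PySem.List.pyRange_one_cons (by unfold pvM; omega)]
        simp only [pvWalk, pvIsValidIndex, hi, hin, hj, hjm, decide_true,
          Bool.and_self, if_pos, List.map_cons]
        rw [show i - d + 1 = (i + 1) - d by ring, ih (i + 1) d (by omega) (by omega) (by omega)]
        rfl
      · have hend : min (matrix.length : Int) (d + pvM matrix) ≤ i := by
          rcases lt_or_ge i (matrix.length : Int) with h | h
          · rcases lt_or_ge (i - d) (pvM matrix) with h2 | h2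
            · exact absurd (by
                simp only [pvIsValidIndex, Bool.and_eq_true, decide_eq_true_eq]
                exact ⟨⟨⟨hi, h⟩, hj⟩, h2⟩) hv
            · unfold pvM at h2 ⊢; omega
          · omega
        rw [PySem.List.pyRange_one_eq_nil hend]
        simp only [pvWalk]
        rw [if_neg hv]
        rfl

-- range(k, 0, -1) lists the negations of range(-k, 0, 1)
lemma pvRange_countdown (k : Nat) :
    PySem.List.pyRange (k : Int) 0 (-1) =
      (PySem.List.pyRange (-(k : Int)) 0 1).map (fun d => -d) := by
  induction k with
  | zero =>
      rw [PySem.List.pyRange_neg_one_eq_nil (by omega), PySem.List.pyRange_one_eq_nil (by omega)]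
      rfl
  | succ k ih =>
      rw [PySem.List.pyRange_neg_one_cons (by push_cast; omega),
        PySem.List.pyRange_one_cons (by push_cast; omega)]
      push_cast
      rw [List.map_cons, show -((k : Int) + 1) + 1 = -(k : Int) by ring,
        show (k : Int) + 1 - 1 = (k : Int) by ring, ih]
      simp

-- Int version of the countdown correspondence (both sides empty for a ≤ 0)
lemma pvRange_countdown' (a : Int) :
    PySem.List.pyRange a 0 (-1) = (PySem.List.pyRange (-a) 0 1).map (fun d => -d) := by
  by_cases h : a ≤ 0
  · rw [PySem.List.pyRange_neg_one_eq_nil h, PySem.List.pyRange_one_eq_nil (by omega)]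
    rfl
  · rw [show a = ((a.toNat : Nat) : Int) by omega]
    exact pvRange_countdown a.toNat

-- A's result, as a map of the closed-form diagonals over d = -(m-1) … -1, 0 … n-1
lemma pvA_eq (matrix : List String) :
    to_desc_diagonals matrix =
      ((PySem.List.pyRange (-(pvM matrix - 1)) 0 1 ++
          PySem.List.pyRange 0 (matrix.length : Int) 1).map
        (fun d => String.ofList (pvDiag matrix d))) := by
  rw [List.map_append]
  simp only [to_desc_diagonals, List.map_append]
  congr 1
  · -- first pass: j_idx = m-1 … 1  vs  d = -(m-1) … -1
    rw [List.map_map]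
    have hM : (((PySem.List.pyGet? matrix 0).getD "").toList.length : Int) - 1 = pvM matrix - 1 := rfl
    rw [hM, pvRange_countdown', List.map_map]
    refine List.map_congr_left (fun d hd => ?_)
    rw [PySem.List.mem_pyRange_one] at hd
    have hw := pvWalk_eq matrix (matrix.length + 1) 0 d le_rfl (by omega)
      (by push_cast; omega)
    rw [zero_sub] at hw
    simp only [Function.comp_apply]
    rw [hw]
    unfold pvDiag
    rw [max_eq_right hd.2.le]
  · -- second pass: i_idx = 0 … n-1  vs  d = 0 … n-1
    rw [List.map_map]
    refine List.map_congr_left (fun i hi => ?_)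
    rw [PySem.List.mem_pyRange_one] at hi
    have hw := pvWalk_eq matrix (matrix.length + 1) i i hi.1 (by omega)
      (by push_cast; omega)
    rw [sub_self] at hw
    simp only [Function.comp_apply]
    rw [hw]
    unfold pvDiag
    rw [max_eq_left hi.1]

-- ===== B-side: the dict-scatter fold fills bucket d with the closed-form diagonal d =====

-- the values keyed d produced by row i: one cell if diagonal d meets row i
lemma pvRow_filter (matrix : List String) (d : Int) (i : Int) :
    ((pvRow matrix i).filter (fun p => p.1 == d)).map Prod.snd =
      if d ≤ i ∧ i < d + pvM matrix then [pvCell matrix d i] else [] := by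
  unfold pvRow
  rw [List.filter_map]
  have hcongr : ((PySem.List.pyRange 0 (pvM matrix) 1).filter
      ((fun p : Int × Char => p.1 == d) ∘ (fun j =>
        (i - j, (PySem.List.pyGet? (((PySem.List.pyGet? matrix i).getD "").toList) j).getD ' ')))) =
      ((PySem.List.pyRange 0 (pvM matrix) 1).filter (fun j => j == i - d)) := by
    refine List.filter_congr (fun j hj => ?_)
    simp only [Function.comp_apply]
    rw [Bool.eq_iff_iff]
    simp only [beq_iff_eq]
    omega
  rw [hcongr, List.filter_beq]
  by_cases hc : d ≤ i ∧ i < d + pvM matrix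
  · rw [List.count_eq_one_of_mem (PySem.List.nodup_pyRange_one 0 (pvM matrix))
      (PySem.List.mem_pyRange_one.mpr ⟨by omega, by omega⟩)]
    rw [if_pos hc]
    unfold pvCell
    simp
  · rw [List.count_eq_zero_of_not_mem (by rw [PySem.List.mem_pyRange_one]; omega), if_neg hc]
    rfl

-- all scattered values keyed d from rows a … n-1: the diagonal d restricted to rows ≥ a
lemma pvPs_filter (matrix : List String) (d : Int) :
    ∀ (t : Nat) (a : Int), 0 ≤ a → ((matrix.length : Int) - a).toNat ≤ t →
    ((((PySem.List.pyRange a (matrix.length : Int) 1).flatMap (pvRow matrix)).filter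
        (fun p => p.1 == d)).map Prod.snd) =
      (PySem.List.pyRange (max a d) (min (matrix.length : Int) (d + pvM matrix)) 1).map
        (pvCell matrix d) := by
  intro t
  induction t with
  | zero =>
      intro a ha h
      rw [PySem.List.pyRange_one_eq_nil (by omega), PySem.List.pyRange_one_eq_nil (by omega)]
      rfl
  | succ t ih =>
      intro a ha h
      by_cases hab : (matrix.length : Int) ≤ a
      · rw [PySem.List.pyRange_one_eq_nil hab, PySem.List.pyRange_one_eq_nil (by omega)]
        rfl
      · rw [PySem.List.pyRange_one_cons (by omega), List.flatMap_cons, List.filter_append,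
          List.map_append, pvRow_filter matrix d a, ih (a + 1) (by omega) (by omega)]
        by_cases h1 : d ≤ a ∧ a < d + pvM matrix
        · rw [if_pos h1, show max a d = a from by omega,
            show max (a + 1) d = a + 1 from by omega,
            PySem.List.pyRange_one_cons
              (show a < min (matrix.length : Int) (d + pvM matrix) from by omega)]
          rfl
        · rw [if_neg h1]
          rcases not_and_or.mp h1 with h2 | h2
          · rw [show max a d = max (a + 1) d from by omega]
            simp
          · rw [PySem.List.pyRange_one_eq_nil (by omega), PySem.List.pyRange_one_eq_nil (by omega)]
            simp

-- B's result, as the same map of closed-form diagonals over d = -(m-1) … -1, 0 … n-1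
lemma pvB_eq (matrix : List String) :
    to_desc_diagonals_alt matrix =
      ((PySem.List.pyRange (-(pvM matrix - 1)) 0 1 ++
          PySem.List.pyRange 0 (matrix.length : Int) 1).map
        (fun d => String.ofList (pvDiag matrix d))) := by
  have h1 : to_desc_diagonals_alt matrix =
      ((PySem.List.pyRange (-(pvM matrix - 1)) 0 1 ++
          PySem.List.pyRange 0 (matrix.length : Int) 1).map
        (fun d => String.ofList
          ((((PySem.List.pyRange 0 (matrix.length : Int) 1).flatMap (pvRow matrix)).foldl
              (fun bs p => bs.modify p.1 ([] : List Char) (fun b => b ++ [p.2]))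
              (PySem.Dict.empty : PySem.Dict Int (List Char))).getD d []))) := by
    simp only [to_desc_diagonals_alt, List.foldl_flatMap, pvRow, List.foldl_map, pvM]
  rw [h1]
  refine List.map_congr_left (fun d _ => ?_)
  rw [PySem.Dict.getD_foldl_modify_append, PySem.Dict.getD_empty, List.nil_append,
    pvPs_filter matrix d (matrix.length) 0 le_rfl (by omega)]
  unfold pvDiag
  rw [max_comm]

-- ===== VERDICT (by name: the statement is the Claim_ definition above) =====
theorem to_desc_diagonals_spec : Claim_equal_to_desc_diagonals := by
  intro matrix _hdom _hpre
  unfold Spec_to_desc_diagonals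
  rw [pvA_eq matrix, pvB_eq matrix]
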